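-- pv_equiv track=rewrite | github.com/DigilabNLCR/BibleCitations | biblical_intertextuality_package.py | check_overlap_of_subs_ranges
-- ===== SOURCE A (Python) =====
-- def check_overlap_of_subs_ranges(subs_ranges:list):
--     """
--     This function checks if there are overlaps between ranges of subverses within the query string.
--
--     :param subs_ranges: list of lists of ranges (e.g., [[(1,3)], [(5,6), (8,15)]])
--     """
--     overlap_stats = []
--     for a, s_range_a in enumerate(subs_ranges):
--         overlaps_of_sub_a = {}
--         for b, s_range_b in enumerate(subs_ranges):
--             if a == b:
--                 continue
--             else:
--                 current_stat = False
--                 for a_range in s_range_a: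
--                     for b_range in s_range_b:
--                         try:
--                             for i in range(a_range[0], a_range[1]+1):
--                                 if i in range(b_range[0], b_range[1]+1):
--                                     current_stat = True
--                                     break
--
--                         except IndexError:
--                             continue
--                 overlaps_of_sub_a[b] = current_stat
--
--         overlap_stats.append(overlaps_of_sub_a)
--
--     return overlap_stats
-- ===== SOURCE B (Python) =====
-- def check_overlap_of_subs_ranges(subs_ranges: list):
--     """
--     Interval-arithmetic re-implementation: two closed ranges [a0,a1] and [b0,b1]
--     intersect iff max(a0,b0) <= min(b1,a1), so no integer iteration is needed.
--     Intervals with fewer than two endpoints (IndexError in the original) are dropped.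
--     """
--     groups = [[(r[0], r[1]) for r in g if len(r) >= 2] for g in subs_ranges]
--     n = len(groups)
--
--     def overlaps(ga, gb):
--         return any(max(x0, y0) <= min(x1, y1) for x0, x1 in ga for y0, y1 in gb)
--
--     return [{b: overlaps(groups[a], groups[b]) for b in range(n) if b != a}
--             for a in range(n)]
-- ===== Notes on version B (the rewrite author's own statement) =====
-- stated objective: faster
-- what changed: Replaces the per-pair iteration over every integer of each range (membership test i in range(...)) by the closed-form interval-intersection test max(lo1,lo2) <= min(hi1,hi2) on endpoint pairs pre-extracted once per group (malformed intervals filtered by length instead of a caught IndexError).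
import Mathlib
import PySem

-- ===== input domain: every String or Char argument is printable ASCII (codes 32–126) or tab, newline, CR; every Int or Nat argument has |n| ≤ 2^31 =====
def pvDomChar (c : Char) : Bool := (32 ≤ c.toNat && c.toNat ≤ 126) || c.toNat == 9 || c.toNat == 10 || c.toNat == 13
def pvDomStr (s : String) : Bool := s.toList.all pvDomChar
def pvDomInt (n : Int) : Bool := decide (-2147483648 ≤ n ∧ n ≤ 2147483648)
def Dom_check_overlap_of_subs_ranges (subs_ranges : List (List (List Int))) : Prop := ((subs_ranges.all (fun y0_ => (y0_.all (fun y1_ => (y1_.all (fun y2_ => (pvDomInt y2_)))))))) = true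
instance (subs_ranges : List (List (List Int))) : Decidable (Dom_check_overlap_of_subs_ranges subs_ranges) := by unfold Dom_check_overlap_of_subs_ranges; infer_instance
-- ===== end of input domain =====

-- B replaces A's per-pair iteration over every integer of each range by the closed-form
-- interval-intersection test max(lo1,lo2) ≤ min(hi1,hi2) on endpoint pairs extracted once per group (faster).

-- ===== PORT A =====
-- Literal port of A: nested enumerate loops, dict per row, per interval pair a loop over
-- range(a_range[0], a_range[1]+1) with a break that sets current_stat (rendered as `cs || any`,
-- exact since the loop only ever turns the flag on).  a_range[0]/a_range[1]/b_range[0]/b_range[1]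
-- are pyGet?; a `none` is Python's IndexError, caught by the try ('continue'), so the state cs is
-- kept unchanged there (if the a-range is empty the b-subscript is never evaluated — also cs).
def check_overlap_of_subs_ranges (subs_ranges : List (List (List Int))) : List (List (Int × Bool)) :=
  ((PySem.List.enumerate subs_ranges).foldl (fun overlap_stats ap =>
    let overlaps_of_sub_a : PySem.Dict Int Bool :=
      (PySem.List.enumerate subs_ranges).foldl (fun ov bp =>
        if ap.1 = bp.1 then ov
        else
          let current_stat := ap.2.foldl (fun cs a_range =>
            bp.2.foldl (fun cs b_range =>
              match PySem.List.pyGet? a_range 0, PySem.List.pyGet? a_range 1 with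
              | some a0, some a1 =>
                (match PySem.List.pyGet? b_range 0, PySem.List.pyGet? b_range 1 with
                 | some b0, some b1 =>
                     cs || (PySem.List.pyRange a0 (a1+1) 1).any (fun i => decide (b0 ≤ i ∧ i ≤ b1))
                 | _, _ => cs)
              | _, _ => cs) cs) false
          ov.insert bp.1 current_stat) PySem.Dict.empty
    overlap_stats ++ [overlaps_of_sub_a.items]) [])

-- ===== PORT B =====
-- B-side helpers ('(r[0], r[1]) for r in g if len(r) >= 2' and the 'overlaps' closure)
def pvValidPairs (g : List (List Int)) : List (Int × Int) :=
  g.filterMap (fun r => match r with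
    | x0 :: x1 :: _ => some (x0, x1)
    | _ => none)

def pvOverlaps (ga gb : List (Int × Int)) : Bool :=
  ga.any (fun p => gb.any (fun q => decide (max p.1 q.1 ≤ min p.2 q.2)))

def check_overlap_of_subs_ranges_alt (subs_ranges : List (List (List Int))) : List (List (Int × Bool)) :=
  let groups := subs_ranges.map pvValidPairs
  let n : Int := groups.length
  (PySem.List.pyRange 0 n 1).map (fun a =>
    ((PySem.List.pyRange 0 n 1).filter (fun b => b ≠ a)).map (fun b =>
      (b, pvOverlaps (PySem.List.pyGetD groups a []) (PySem.List.pyGetD groups b []))))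

-- ===== PRECONDITION & SPEC =====
def Spec_check_overlap_of_subs_ranges (subs_ranges : List (List (List Int))) (out : List (List (Int × Bool))) : Prop := out = check_overlap_of_subs_ranges_alt subs_ranges
instance (subs_ranges : List (List (List Int))) (out : List (List (Int × Bool))) : Decidable (Spec_check_overlap_of_subs_ranges subs_ranges out) := by unfold Spec_check_overlap_of_subs_ranges; infer_instance

-- ===== CLAIM (what is proved, stated in full; the proofs are below) =====
def Claim_equal_check_overlap_of_subs_ranges : Prop := ∀ (subs_ranges : List (List (List Int))), Dom_check_overlap_of_subs_ranges subs_ranges → Spec_check_overlap_of_subs_ranges subs_ranges (check_overlap_of_subs_ranges subs_ranges)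

-- ===== LEMMAS AND PROOFS =====

-- existence of an integer in both closed ranges ↔ the endpoint test
lemma pv_any_range_overlap (a0 a1 b0 b1 : Int) :
    ((PySem.List.pyRange a0 (a1+1) 1).any (fun i => decide (b0 ≤ i ∧ i ≤ b1)))
      = decide (max a0 b0 ≤ min a1 b1) := by
  rw [Bool.eq_iff_iff]
  simp only [List.any_eq_true, PySem.List.mem_pyRange_one, decide_eq_true_eq]
  constructor
  · rintro ⟨i, ⟨h1, h2⟩, h3, h4⟩; omega
  · intro h; exact ⟨max a0 b0, by omega, by omega⟩

-- a flag only ever turned on: the fold is `init || any`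
lemma pv_foldl_or {α : Type} (l : List α) (g : α → Bool) (b : Bool) :
    l.foldl (fun acc x => acc || g x) b = (b || l.any g) := by
  induction l generalizing b with
  | nil => simp
  | cons x t ih => simp [List.any_cons, ih, Bool.or_assoc]

-- any over the extracted endpoint pairs = any over the raw intervals with the pyGet? match
lemma pv_any_validPairs (g : List (List Int)) (f : Int × Int → Bool) :
    (pvValidPairs g).any f
      = g.any (fun r => match PySem.List.pyGet? r 0, PySem.List.pyGet? r 1 with
          | some x0, some x1 => f (x0, x1)
          | _, _ => false) := by
  induction g with
  | nil => rfl
  | cons r t ih =>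
      match r with
      | [] => simpa [pvValidPairs, PySem.List.pyGet?] using ih
      | [x0] => simpa [pvValidPairs, PySem.List.pyGet?, PySem.List.pyIdx?] using ih
      | x0 :: x1 :: rest =>
          simp only [pvValidPairs, List.filterMap_cons] at *
          simp [ih]

-- A's per-pair accumulation = flag || closed-form overlap test on the valid endpoint pairs
lemma pv_stat_eq (sa sb : List (List Int)) (cs : Bool) :
    sa.foldl (fun cs a_range =>
      sb.foldl (fun cs b_range =>
        match PySem.List.pyGet? a_range 0, PySem.List.pyGet? a_range 1 with
        | some a0, some a1 =>
          (match PySem.List.pyGet? b_range 0, PySem.List.pyGet? b_range 1 with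
           | some b0, some b1 =>
               cs || (PySem.List.pyRange a0 (a1+1) 1).any (fun i => decide (b0 ≤ i ∧ i ≤ b1))
           | _, _ => cs)
        | _, _ => cs) cs) cs
    = (cs || pvOverlaps (pvValidPairs sa) (pvValidPairs sb)) := by
  have inner : ∀ (a_range : List Int) (cs : Bool),
      sb.foldl (fun cs b_range =>
        match PySem.List.pyGet? a_range 0, PySem.List.pyGet? a_range 1 with
        | some a0, some a1 =>
          (match PySem.List.pyGet? b_range 0, PySem.List.pyGet? b_range 1 with
           | some b0, some b1 =>
               cs || (PySem.List.pyRange a0 (a1+1) 1).any (fun i => decide (b0 ≤ i ∧ i ≤ b1))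
           | _, _ => cs)
        | _, _ => cs) cs
      = (cs ||
          (match PySem.List.pyGet? a_range 0, PySem.List.pyGet? a_range 1 with
           | some a0, some a1 =>
               (pvValidPairs sb).any (fun q => decide (max a0 q.1 ≤ min a1 q.2))
           | _, _ => false)) := by
    intro a_range cs
    rcases ha : PySem.List.pyGet? a_range 0 with _ | a0 <;>
      rcases ha' : PySem.List.pyGet? a_range 1 with _ | a1 <;>
      simp only [ha, ha']
    · simpa using PySem.List.foldl_ignore (l := sb) (init := cs)
    · simpa using PySem.List.foldl_ignore (l := sb) (init := cs)
    · simpa using PySem.List.foldl_ignore (l := sb) (init := cs)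
    · have step : sb.foldl (fun cs b_range =>
            (match PySem.List.pyGet? b_range 0, PySem.List.pyGet? b_range 1 with
             | some b0, some b1 =>
                 cs || (PySem.List.pyRange a0 (a1+1) 1).any (fun i => decide (b0 ≤ i ∧ i ≤ b1))
             | _, _ => cs)) cs
          = sb.foldl (fun cs b_range =>
              cs || (match PySem.List.pyGet? b_range 0, PySem.List.pyGet? b_range 1 with
               | some b0, some b1 => decide (max a0 b0 ≤ min a1 b1)
               | _, _ => false)) cs := by
        apply PySem.List.foldl_congr_mem
        intro acc b_range _
        rcases hb : PySem.List.pyGet? b_range 0 with _ | b0 <;>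
          rcases hb' : PySem.List.pyGet? b_range 1 with _ | b1
        · simp
        · simp
        · simp
        · simp only []
          rw [pv_any_range_overlap]
      rw [step, pv_foldl_or, pv_any_validPairs]
  have outer : sa.foldl (fun cs a_range =>
      sb.foldl (fun cs b_range =>
        match PySem.List.pyGet? a_range 0, PySem.List.pyGet? a_range 1 with
        | some a0, some a1 =>
          (match PySem.List.pyGet? b_range 0, PySem.List.pyGet? b_range 1 with
           | some b0, some b1 =>
               cs || (PySem.List.pyRange a0 (a1+1) 1).any (fun i => decide (b0 ≤ i ∧ i ≤ b1))
           | _, _ => cs)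
        | _, _ => cs) cs) cs
    = sa.foldl (fun cs a_range =>
        cs || (match PySem.List.pyGet? a_range 0, PySem.List.pyGet? a_range 1 with
           | some a0, some a1 =>
               (pvValidPairs sb).any (fun q => decide (max a0 q.1 ≤ min a1 q.2))
           | _, _ => false)) cs := by
    apply PySem.List.foldl_congr_mem
    intro acc a_range _
    exact inner a_range acc
  rw [outer, pv_foldl_or]
  congr 1
  rw [pvOverlaps, pv_any_validPairs]

-- the dict-building row loop (skip b = a, insert fresh distinct keys) as filter + map on items
lemma pv_dict_items (lst : List (Int × List (List Int))) (a : Int)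
    (f : Int × List (List Int) → Bool) (hnd : (lst.map (·.1)).Nodup) :
    (lst.foldl (fun ov bp => if a = bp.1 then ov else ov.insert bp.1 (f bp))
        (PySem.Dict.empty (κ := Int) (ν := Bool))).items
    = (lst.filter (fun bp => decide (bp.1 ≠ a))).map (fun bp => (bp.1, f bp)) := by
  have hfun : (lst.foldl (fun ov bp => if a = bp.1 then ov else ov.insert bp.1 (f bp))
        (PySem.Dict.empty (κ := Int) (ν := Bool)))
      = lst.foldl (fun ov bp => if bp.1 ≠ a then ov.insert bp.1 (f bp) else ov) PySem.Dict.empty := by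
    apply PySem.List.foldl_congr_mem
    intro acc bp _
    by_cases h : a = bp.1
    · simp [h]
    · simp [h, Ne.symm h]
  rw [hfun, PySem.List.foldl_ite_eq_foldl_filter (p := fun bp : Int × List (List Int) => bp.1 ≠ a)]
  rw [PySem.Dict.items_foldl_insert_fresh _ (fun bp => bp.1) (fun bp => f bp)]
  · rfl
  · intro p _; exact PySem.Dict.contains_empty _
  · exact hnd.sublist (List.Sublist.map _ List.filter_sublist)

-- ===== VERDICT (by name: the statement is the Claim_ definition above) =====
theorem check_overlap_of_subs_ranges_spec : Claim_equal_check_overlap_of_subs_ranges := by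
  intro subs _
  unfold Spec_check_overlap_of_subs_ranges
  simp only [check_overlap_of_subs_ranges, check_overlap_of_subs_ranges_alt]
  rw [PySem.List.foldl_append_singleton_eq_map, List.nil_append]
  -- per-pair statistic in closed form
  have hstat : ∀ (ap bp : Int × List (List Int)),
      (ap.2.foldl (fun cs a_range =>
        bp.2.foldl (fun cs b_range =>
          match PySem.List.pyGet? a_range 0, PySem.List.pyGet? a_range 1 with
          | some a0, some a1 =>
            (match PySem.List.pyGet? b_range 0, PySem.List.pyGet? b_range 1 with
             | some b0, some b1 =>
                 cs || (PySem.List.pyRange a0 (a1+1) 1).any (fun i => decide (b0 ≤ i ∧ i ≤ b1))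
             | _, _ => cs)
          | _, _ => cs) cs) false)
      = pvOverlaps (pvValidPairs ap.2) (pvValidPairs bp.2) := by
    intro ap bp
    simpa using pv_stat_eq ap.2 bp.2 false
  have hnd : ((PySem.List.enumerate subs).map (·.1)).Nodup := by
    rw [PySem.List.map_fst_enumerate]
    exact PySem.List.nodup_pyRange_one _ _
  have hrow : ∀ (ap : Int × List (List Int)),
      ((PySem.List.enumerate subs).foldl (fun ov bp =>
          if ap.1 = bp.1 then ov
          else ov.insert bp.1 (ap.2.foldl (fun cs a_range =>
            bp.2.foldl (fun cs b_range =>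
              match PySem.List.pyGet? a_range 0, PySem.List.pyGet? a_range 1 with
              | some a0, some a1 =>
                (match PySem.List.pyGet? b_range 0, PySem.List.pyGet? b_range 1 with
                 | some b0, some b1 =>
                     cs || (PySem.List.pyRange a0 (a1+1) 1).any (fun i => decide (b0 ≤ i ∧ i ≤ b1))
                 | _, _ => cs)
              | _, _ => cs) cs) false)) PySem.Dict.empty).items
      = ((PySem.List.enumerate subs).filter (fun bp => decide (bp.1 ≠ ap.1))).map
          (fun bp => (bp.1, pvOverlaps (pvValidPairs ap.2) (pvValidPairs bp.2))) := by
    intro ap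
    have hcongr : ((PySem.List.enumerate subs).foldl (fun ov bp =>
          if ap.1 = bp.1 then ov
          else ov.insert bp.1 (ap.2.foldl (fun cs a_range =>
            bp.2.foldl (fun cs b_range =>
              match PySem.List.pyGet? a_range 0, PySem.List.pyGet? a_range 1 with
              | some a0, some a1 =>
                (match PySem.List.pyGet? b_range 0, PySem.List.pyGet? b_range 1 with
                 | some b0, some b1 =>
                     cs || (PySem.List.pyRange a0 (a1+1) 1).any (fun i => decide (b0 ≤ i ∧ i ≤ b1))
                 | _, _ => cs)
              | _, _ => cs) cs) false)) PySem.Dict.empty)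
        = ((PySem.List.enumerate subs).foldl (fun ov bp =>
          if ap.1 = bp.1 then ov
          else ov.insert bp.1 (pvOverlaps (pvValidPairs ap.2) (pvValidPairs bp.2))) PySem.Dict.empty) := by
      apply PySem.List.foldl_congr_mem
      intro acc bp _
      rw [hstat ap bp]
    rw [hcongr, pv_dict_items _ _ _ hnd]
  rw [List.map_congr_left (fun ap _ => hrow ap)]
  -- both sides as maps over pyRange 0 n 1
  have hlen : ((subs.map pvValidPairs).length : Int) = PySem.List.len subs := by
    simp [PySem.List.len]
  rw [PySem.List.enumerate_eq_map_pyRange subs ([] : List (List Int)), hlen]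
  simp only [List.filter_map, List.map_map]
  apply List.map_congr_left
  intro a ha
  simp only [Function.comp]
  have hg : ∀ j : Int, PySem.List.pyGetD (subs.map pvValidPairs) j []
      = pvValidPairs (PySem.List.pyGetD subs j []) := fun j => by
    simpa using PySem.List.pyGetD_map pvValidPairs subs j []
  congr 1
  funext b
  simp [Function.comp, hg]
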